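-- pv_equiv track=rewrite | github.com/shyamk01/hackerrank | maintest.py | checkPatienceStatus
-- ===== SOURCE A (Python) =====
-- def checkPatienceStatus(viruscompo, inpone):
--     arrstr = []
--     flag = 0
--     for pone in inpone:
--         k = 0
--         str = ""
--         for i in range(len(pone)):
--             for _ in range(len(viruscompo)):
--                 if set(pone).issubset(set(viruscompo)):
--                     flag = 1
--                 else:
--                     break
--                 if k <= len(viruscompo) - 1 and pone[i] == viruscompo[k] and flag == 1:
--                     str = str + pone[i]
--                     break
--                 else:
--                     k = k + 1
--
--         if pone == str:
--             arrstr.append("POSITIVE")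
--         elif flag == 0:
--             arrstr.append("NEGATIVE")
--
--         else:
--             arrstr.append("NEGATIVE")
--     return arrstr
-- ===== SOURCE B (Python) =====
-- def checkPatienceStatus(viruscompo, inpone):
--     res = []
--     for pone in inpone:
--         k = 0
--         ok = True
--         for c in pone:
--             while k < len(viruscompo) and viruscompo[k] != c:
--                 k += 1
--             if k == len(viruscompo):
--                 ok = False
--                 break
--         res.append("POSITIVE" if ok else "NEGATIVE")
--     return res
-- ===== Notes on version B (the rewrite author's own statement) =====
-- stated objective: faster
-- what changed: Replaced A's triple-nested loop (which rebuilds set(pone) and set(viruscompo) on every innermost iteration and threads a redundant flag) with a single two-pointer greedy scan per string.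
import Mathlib
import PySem

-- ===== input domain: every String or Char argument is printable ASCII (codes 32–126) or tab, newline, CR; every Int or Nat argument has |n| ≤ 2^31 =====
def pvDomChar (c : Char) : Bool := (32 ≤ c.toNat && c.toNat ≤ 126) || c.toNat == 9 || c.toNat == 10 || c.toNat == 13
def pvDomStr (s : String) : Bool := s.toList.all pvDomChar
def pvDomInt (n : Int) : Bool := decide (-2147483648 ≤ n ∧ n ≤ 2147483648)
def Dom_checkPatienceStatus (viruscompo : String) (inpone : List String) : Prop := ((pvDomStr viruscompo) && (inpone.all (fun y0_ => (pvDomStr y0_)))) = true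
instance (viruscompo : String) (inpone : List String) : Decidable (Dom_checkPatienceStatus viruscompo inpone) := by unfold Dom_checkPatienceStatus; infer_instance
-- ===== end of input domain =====

-- B rewrites A's triple-nested scan (rebuilding both character sets on every inner
-- iteration) as a single two-pointer pass per string; same return value, asymptotically faster.

-- ===== PORT A =====
-- set(pone).issubset(set(viruscompo))
def pvSubset (pone0 virus : List Char) : Bool :=
  PySem.Set.issubset (PySem.Set.ofList pone0) (PySem.Set.ofList virus)

-- the inner 'for _ in range(len(viruscompo))' loop (fuel = len(viruscompo)), with its breaks
def pvInner (virus pone0 : List Char) (c : Char) : Nat → Nat → List Char → Int → Nat × List Char × Int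
  | 0, k, str, flag => (k, str, flag)
  | fuel+1, k, str, flag =>
    if pvSubset pone0 virus then
      let flag := (1 : Int)
      if ((k : Int) ≤ (virus.length : Int) - 1 && (PySem.List.pyGetD virus (k : Int) ' ' == c)
            && (flag == 1)) then
        (k, str ++ [c], flag)                 -- str = str + pone[i]; break
      else
        pvInner virus pone0 c fuel (k+1) str flag
    else (k, str, flag)                        -- break

-- the 'for i in range(len(pone))' loop (pone[i] visited in order)
def pvAFold (virus pone0 : List Char) : List Char → Nat → List Char → Int → Nat × List Char × Int
  | [], k, str, flag => (k, str, flag)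
  | ch :: rest, k, str, flag =>
    let s := pvInner virus pone0 ch virus.length k str flag
    pvAFold virus pone0 rest s.1 s.2.1 s.2.2

def checkPatienceStatus (viruscompo : String) (inpone : List String) : List String :=
  (inpone.foldl (fun (acc : List String × Int) pone =>
      let r := pvAFold viruscompo.toList pone.toList pone.toList 0 [] acc.2
      (acc.1 ++ [if pone.toList = r.2.1 then "POSITIVE"
                 else if r.2.2 = 0 then "NEGATIVE" else "NEGATIVE"], r.2.2))
    ([], 0)).1

-- ===== PORT B =====
-- while k < len(viruscompo) and viruscompo[k] != c: k += 1
def pvAdv (virus : List Char) (c : Char) (k : Nat) : Nat :=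
  if h : k < virus.length then
    if virus[k] ≠ c then pvAdv virus c (k+1) else k
  else k
termination_by virus.length - k

-- for c in pone: … ; break when the pointer falls off the end
def pvBLoop (virus : List Char) : List Char → Nat → Bool
  | [], _ => true
  | c :: rest, k =>
    let k' := pvAdv virus c k
    if k' = virus.length then false else pvBLoop virus rest k'

def checkPatienceStatus_alt (viruscompo : String) (inpone : List String) : List String :=
  inpone.map (fun pone =>
    if pvBLoop viruscompo.toList pone.toList 0 then "POSITIVE" else "NEGATIVE")

-- ===== PRECONDITION & SPEC =====
def Spec_checkPatienceStatus (viruscompo : String) (inpone : List String) (out : List String) : Prop := out = checkPatienceStatus_alt viruscompo inpone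
instance (viruscompo : String) (inpone : List String) (out : List String) : Decidable (Spec_checkPatienceStatus viruscompo inpone out) := by unfold Spec_checkPatienceStatus; infer_instance

-- ===== CLAIM (what is proved, stated in full; the proofs are below) =====
def Claim_equal_checkPatienceStatus : Prop := ∀ (viruscompo : String) (inpone : List String), Dom_checkPatienceStatus viruscompo inpone → Spec_checkPatienceStatus viruscompo inpone (checkPatienceStatus viruscompo inpone)

-- ===== LEMMAS AND PROOFS =====
theorem pvAdv_ge (virus : List Char) (c : Char) (k : Nat) : k ≤ pvAdv virus c k := by
  fun_induction pvAdv virus c k with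
  | case1 k h hne ih => omega
  | case2 k h he => omega
  | case3 k h => omega

theorem pvAdv_le (virus : List Char) (c : Char) (k : Nat) (h : k ≤ virus.length) :
    pvAdv virus c k ≤ virus.length := by
  fun_induction pvAdv virus c k with
  | case1 k h2 hne ih => exact ih (by omega)
  | case2 k h2 he => omega
  | case3 k h2 => omega

theorem pvAdv_mem (virus : List Char) (c : Char) (k : Nat) (h : pvAdv virus c k < virus.length) :
    c ∈ virus := by
  fun_induction pvAdv virus c k with
  | case1 k h2 hne ih => exact ih h
  | case2 k h2 he => exact (by simpa using he : virus[k] = c) ▸ List.getElem_mem h2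
  | case3 k h2 => omega

theorem pvAdv_eq_of (virus : List Char) (c : Char) (k : Nat) (h : k < virus.length)
    (hne : virus[k] ≠ c) : pvAdv virus c k = pvAdv virus c (k+1) := by
  rw [pvAdv]; simp only [dif_pos h, if_pos hne]

theorem pvAdv_stop (virus : List Char) (c : Char) (k : Nat) (h : ¬ k < virus.length) :
    pvAdv virus c k = k := by
  rw [pvAdv]; simp only [dif_neg h]

theorem pvAdv_hit (virus : List Char) (c : Char) (k : Nat) (h : k < virus.length)
    (he : virus[k] = c) : pvAdv virus c k = k := by
  rw [pvAdv]; simp only [dif_pos h]; simp [he]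
theorem pvInner_match (virus pone0 : List Char) (c : Char) (hs : pvSubset pone0 virus = true) :
    ∀ fuel k str flag, pvAdv virus c k < virus.length → pvAdv virus c k - k < fuel →
      pvInner virus pone0 c fuel k str flag = (pvAdv virus c k, str ++ [c], 1) := by
  intro fuel
  induction fuel with
  | zero => intro k str flag hlt hf; omega
  | succ fuel ih =>
    intro k str flag hlt hf
    have hge := pvAdv_ge virus c k
    by_cases hk : k < virus.length
    · by_cases hc : virus[k] = c
      · have hak : pvAdv virus c k = k := pvAdv_hit _ _ _ hk hc
        rw [pvInner, if_pos hs, if_pos]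
        · rw [hak]
        · simp [pysem, hk, hc]
      · have hstep : pvAdv virus c k = pvAdv virus c (k+1) := pvAdv_eq_of _ _ _ hk hc
        rw [pvInner, if_pos hs, if_neg]
        · rw [hstep] at hlt hf ⊢
          exact ih (k+1) str 1 hlt (by have := pvAdv_ge virus c (k+1); omega)
        · simp [pysem, hk, hc]
    · rw [pvAdv_stop _ _ _ hk] at hlt; omega

theorem pvInner_fail (virus pone0 : List Char) (c : Char) (hs : pvSubset pone0 virus = true) :
    ∀ fuel k str flag, virus.length ≤ pvAdv virus c k →
      (pvInner virus pone0 c fuel k str flag).2.1 = str ∧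
      (pvInner virus pone0 c fuel k str flag).1 = k + fuel := by
  intro fuel
  induction fuel with
  | zero => intro k str flag _; exact ⟨rfl, rfl⟩
  | succ fuel ih =>
    intro k str flag hge
    by_cases hk : k < virus.length
    · have hc : virus[k] ≠ c := by
        intro hc
        rw [pvAdv_hit _ _ _ hk hc] at hge; omega
      have hstep : pvAdv virus c k = pvAdv virus c (k+1) := pvAdv_eq_of _ _ _ hk hc
      rw [pvInner, if_pos hs, if_neg]
      · have := ih (k+1) str 1 (by rwa [← hstep])
        exact ⟨this.1, by omega⟩
      · simp [pysem, hk, hc]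
    · rw [pvInner, if_pos hs, if_neg]
      · have hge2 : virus.length ≤ pvAdv virus c (k+1) := by
          have := pvAdv_ge virus c (k+1); omega
        have := ih (k+1) str 1 hge2
        exact ⟨this.1, by omega⟩
      · simp [pysem]; intro h; omega
theorem pvAFold_nosub (virus pone0 : List Char) (hs : pvSubset pone0 virus = false) :
    ∀ chars k str flag, pvAFold virus pone0 chars k str flag = (k, str, flag) := by
  intro chars
  induction chars with
  | nil => intro k str flag; rfl
  | cons ch rest ih =>
    intro k str flag
    have hinner : ∀ fuel, pvInner virus pone0 ch fuel k str flag = (k, str, flag) := by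
      intro fuel; cases fuel with
      | zero => rfl
      | succ fuel => rw [pvInner, if_neg (by simp [hs])]
    rw [pvAFold, hinner]
    exact ih k str flag

theorem pvAFold_dead (virus pone0 : List Char) (hs : pvSubset pone0 virus = true) :
    ∀ chars k str flag, virus.length ≤ k →
      (pvAFold virus pone0 chars k str flag).2.1 = str := by
  intro chars
  induction chars with
  | nil => intro k str flag _; rfl
  | cons ch rest ih =>
    intro k str flag hk
    have hge : virus.length ≤ pvAdv virus ch k := le_trans hk (pvAdv_ge _ _ _)
    have hi := pvInner_fail virus pone0 ch hs virus.length k str flag hge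
    rw [pvAFold]
    rcases hi with ⟨h1, h2⟩
    rw [show (pvInner virus pone0 ch virus.length k str flag) =
        ((pvInner virus pone0 ch virus.length k str flag).1,
         (pvInner virus pone0 ch virus.length k str flag).2.1,
         (pvInner virus pone0 ch virus.length k str flag).2.2) from rfl, h1, h2]
    exact ih _ _ _ (by omega)

theorem pvAFold_success (virus pone0 : List Char) (hs : pvSubset pone0 virus = true) :
    ∀ chars k str flag, k ≤ virus.length → pvBLoop virus chars k = true →
      (pvAFold virus pone0 chars k str flag).2.1 = str ++ chars := by
  intro chars
  induction chars with
  | nil => intro k str flag _ _; simp [pvAFold]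
  | cons ch rest ih =>
    intro k str flag hk hb
    rw [pvBLoop] at hb
    by_cases hstop : pvAdv virus ch k = virus.length
    · simp [hstop] at hb
    · have hlt : pvAdv virus ch k < virus.length :=
        lt_of_le_of_ne (pvAdv_le _ _ _ hk) hstop
      simp only [if_neg hstop] at hb
      have hi := pvInner_match virus pone0 ch hs virus.length k str flag hlt
        (by have := pvAdv_ge virus ch k; omega)
      rw [pvAFold, hi]
      simpa using ih (pvAdv virus ch k) (str ++ [ch]) 1 (le_of_lt hlt) hb

theorem pvAFold_failure (virus pone0 : List Char) (hs : pvSubset pone0 virus = true) :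
    ∀ chars k str flag, k ≤ virus.length → pvBLoop virus chars k = false →
      ((pvAFold virus pone0 chars k str flag).2.1).length < str.length + chars.length := by
  intro chars
  induction chars with
  | nil => intro k str flag _ hb; simp [pvBLoop] at hb
  | cons ch rest ih =>
    intro k str flag hk hb
    rw [pvBLoop] at hb
    by_cases hstop : pvAdv virus ch k = virus.length
    · have hge : virus.length ≤ pvAdv virus ch k := le_of_eq hstop.symm
      have hi := pvInner_fail virus pone0 ch hs virus.length k str flag hge
      rw [pvAFold]
      rcases hi with ⟨h1, h2⟩
      rw [show (pvInner virus pone0 ch virus.length k str flag) =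
          ((pvInner virus pone0 ch virus.length k str flag).1,
           (pvInner virus pone0 ch virus.length k str flag).2.1,
           (pvInner virus pone0 ch virus.length k str flag).2.2) from rfl, h1, h2]
      rw [pvAFold_dead virus pone0 hs rest (k + virus.length) str _ (by omega)]
      simp
    · have hlt : pvAdv virus ch k < virus.length :=
        lt_of_le_of_ne (pvAdv_le _ _ _ hk) hstop
      simp only [if_neg hstop] at hb
      have hi := pvInner_match virus pone0 ch hs virus.length k str flag hlt
        (by have := pvAdv_ge virus ch k; omega)
      rw [pvAFold, hi]
      have := ih (pvAdv virus ch k) (str ++ [ch]) 1 (le_of_lt hlt) hb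
      simp at this ⊢
      omega
theorem pvBLoop_mem (virus : List Char) :
    ∀ chars k, k ≤ virus.length → pvBLoop virus chars k = true → ∀ c ∈ chars, c ∈ virus := by
  intro chars
  induction chars with
  | nil => intro k _ _ c hc; simp at hc
  | cons ch rest ih =>
    intro k hk hb c hc
    rw [pvBLoop] at hb
    by_cases hstop : pvAdv virus ch k = virus.length
    · simp [hstop] at hb
    · have hlt : pvAdv virus ch k < virus.length :=
        lt_of_le_of_ne (pvAdv_le _ _ _ hk) hstop
      simp only [if_neg hstop] at hb
      rcases List.mem_cons.mp hc with h | h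
      · exact h ▸ pvAdv_mem virus ch k hlt
      · exact ih (pvAdv virus ch k) (le_of_lt hlt) hb c h

theorem pv_perString (virus chars : List Char) (flag : Int) :
    (if chars = (pvAFold virus chars chars 0 [] flag).2.1 then "POSITIVE"
     else if (pvAFold virus chars chars 0 [] flag).2.2 = 0 then "NEGATIVE" else "NEGATIVE")
    = (if pvBLoop virus chars 0 then "POSITIVE" else "NEGATIVE") := by
  rw [ite_self]
  by_cases hs : pvSubset chars virus = true
  · by_cases hb : pvBLoop virus chars 0 = true
    · have hA := pvAFold_success virus chars hs chars 0 [] flag (Nat.zero_le _) hb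
      simp [hb, hA]
    · have hbf : pvBLoop virus chars 0 = false := by simpa using hb
      have hlen := pvAFold_failure virus chars hs chars 0 [] flag (Nat.zero_le _) hbf
      have hne : chars ≠ (pvAFold virus chars chars 0 [] flag).2.1 := by
        intro he; rw [← he] at hlen; simp at hlen
      simp [hbf, hne]
  · have hs' : pvSubset chars virus = false := by simpa using hs
    rw [pvAFold_nosub virus chars hs' chars 0 [] flag]
    have hne : chars ≠ [] := by
      intro h; subst h
      have : pvSubset ([] : List Char) virus = true := by
        unfold pvSubset
        rw [PySem.Set.issubset_iff]
        intro x hx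
        simp [PySem.Set.ofList] at hx
      rw [this] at hs'; exact absurd hs' (by simp)
    have hbf : pvBLoop virus chars 0 = false := by
      by_contra hbc
      have hb : pvBLoop virus chars 0 = true := by simpa using hbc
      have hall := pvBLoop_mem virus chars 0 (Nat.zero_le _) hb
      have hsub : pvSubset chars virus = true := by
        unfold pvSubset
        rw [PySem.Set.issubset_iff]
        intro x hx
        have hx' : x ∈ chars := by simpa [PySem.Set.mem_ofList] using hx
        simpa [PySem.Set.mem_ofList] using hall x hx'
      rw [hsub] at hs'; exact absurd hs' (by simp)
    simp [hbf, hne]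

theorem pv_outer (virus : List Char) (inpone : List String) :
    ∀ (arr : List String) (flag : Int),
      (inpone.foldl (fun (acc : List String × Int) pone =>
        let r := pvAFold virus pone.toList pone.toList 0 [] acc.2
        (acc.1 ++ [if pone.toList = r.2.1 then "POSITIVE"
                   else if r.2.2 = 0 then "NEGATIVE" else "NEGATIVE"], r.2.2)) (arr, flag)).1
      = arr ++ inpone.map (fun pone =>
          if pvBLoop virus pone.toList 0 then "POSITIVE" else "NEGATIVE") := by
  induction inpone with
  | nil => intro arr flag; simp
  | cons pone rest ih =>
    intro arr flag
    simp only [List.foldl_cons, List.map_cons]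
    rw [ih]
    rw [pv_perString virus pone.toList flag]
    simp

-- ===== VERDICT (by name: the statement is the Claim_ definition above) =====
theorem checkPatienceStatus_spec : Claim_equal_checkPatienceStatus := by
  intro viruscompo inpone _
  unfold Spec_checkPatienceStatus checkPatienceStatus checkPatienceStatus_alt
  rw [pv_outer]
  simp
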